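-- pv_equiv track=rewrite | github.com/saverchenko2002/INMEMO | controllers/component_controllers_helpers/remove_tab_helper.py | get_primary_content
-- ===== SOURCE A (Python) =====
-- import copy
--
-- def get_primary_content(removable_tab_path, primary_tab_path, primary_image_path, tab_images_map):
--
--     updated_tab_images_map = copy.deepcopy(tab_images_map)
--     updated_primary_tab_path = None
--     updated_primary_image_path = None
--
--     updated_tab_images_map.pop(removable_tab_path)
--
--     if primary_tab_path == removable_tab_path and primary_image_path in tab_images_map[removable_tab_path]:
--         for tab_path, images in tab_images_map.items():
--             if tab_path == removable_tab_path:
--                 continue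
--             elif images:
--                 updated_primary_image_path = images[0]
--                 updated_primary_tab_path = tab_path
--                 break
--     elif primary_tab_path == removable_tab_path and primary_image_path not in tab_images_map[removable_tab_path]:
--         for tab_path, images in tab_images_map.items():
--             if primary_image_path in images:
--                 updated_primary_tab_path = tab_path
--                 updated_primary_image_path = primary_image_path
--                 break
--     elif primary_tab_path != removable_tab_path and primary_image_path not in tab_images_map[removable_tab_path]:
--         for tab_path, images in tab_images_map.items():
--             if tab_path != removable_tab_path and images:
--                 updated_primary_image_path = images[0]
--                 updated_primary_tab_path = tab_path
--
--     return updated_primary_image_path, updated_primary_tab_path, updated_tab_images_map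
-- ===== SOURCE B (Python) =====
-- import copy
--
-- def get_primary_content(removable_tab_path, primary_tab_path, primary_image_path, tab_images_map):
--     # One pass over tab_images_map collecting all candidates, then select per case.
--     updated_tab_images_map = copy.deepcopy(tab_images_map)
--     updated_tab_images_map.pop(removable_tab_path)
--     removed_images = tab_images_map[removable_tab_path]
--
--     first_with = None       # first non-removable tab with images -> (image, tab)
--     last_with = None        # last  non-removable tab with images -> (image, tab)
--     first_containing = None # first tab whose images contain primary_image_path
--     for tab_path, images in tab_images_map.items():
--         if tab_path != removable_tab_path and images:
--             if first_with is None: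
--                 first_with = (images[0], tab_path)
--             last_with = (images[0], tab_path)
--         if first_containing is None and primary_image_path in images:
--             first_containing = tab_path
--
--     if primary_tab_path == removable_tab_path:
--         if primary_image_path in removed_images:
--             image, tab = first_with if first_with is not None else (None, None)
--         else:
--             if first_containing is not None:
--                 image, tab = primary_image_path, first_containing
--             else:
--                 image, tab = None, None
--     elif primary_image_path not in removed_images:
--         image, tab = last_with if last_with is not None else (None, None)
--     else:
--         image, tab = None, None
--     return image, tab, updated_tab_images_map
-- ===== Notes on version B (the rewrite author's own statement) =====
-- stated objective: alternative
-- what changed: Replaces A's three case-specific scans over the map (two first-match break loops and one last-match overwrite loop, chosen before scanning) by a single pass that collects all three candidates (first non-removable tab with images, last such tab, first tab containing the primary image) and then selects the output per case; Pre_ excludes only the inputs where removable_tab_path is not a key, on which both A and B raise KeyError.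
import Mathlib
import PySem

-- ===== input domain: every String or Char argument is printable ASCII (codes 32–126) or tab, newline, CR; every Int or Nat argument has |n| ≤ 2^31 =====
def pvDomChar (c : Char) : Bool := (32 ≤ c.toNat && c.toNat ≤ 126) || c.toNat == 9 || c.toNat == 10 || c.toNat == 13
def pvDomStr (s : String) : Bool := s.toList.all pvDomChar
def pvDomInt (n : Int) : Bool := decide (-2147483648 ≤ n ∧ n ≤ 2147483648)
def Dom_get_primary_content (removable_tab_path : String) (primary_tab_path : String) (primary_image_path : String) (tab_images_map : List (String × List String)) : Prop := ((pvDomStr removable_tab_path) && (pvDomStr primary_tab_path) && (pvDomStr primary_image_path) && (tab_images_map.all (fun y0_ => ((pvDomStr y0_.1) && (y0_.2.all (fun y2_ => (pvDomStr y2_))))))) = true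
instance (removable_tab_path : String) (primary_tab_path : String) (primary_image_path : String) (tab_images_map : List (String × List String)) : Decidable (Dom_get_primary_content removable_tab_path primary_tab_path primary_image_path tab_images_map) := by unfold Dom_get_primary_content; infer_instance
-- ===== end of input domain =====

-- B collects all three candidate tabs in a single pass and selects per case, instead of A's
-- three case-specific scans; equal return value wherever removable_tab_path is a key (else both raise).


-- ===== PORT A =====
-- dict built-ins under the assoc-list convention (unique keys): first-match lookup m[k], dict.pop(k)
def pvLookup (m : List (String × List String)) (k : String) : List String :=
  match m with
  | [] => []  -- unreachable under Pre_ (Python raises KeyError earlier, at pop)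
  | (t, is) :: rest => if t = k then is else pvLookup rest k

def pvErase (m : List (String × List String)) (k : String) : List (String × List String) :=
  match m with
  | [] => []
  | (t, is) :: rest => if t = k then rest else (t, is) :: pvErase rest k

-- A's first loop: first non-removable tab with images, break
def pvLoop1 (r : String) : List (String × List String) → Option String × Option String
  | [] => (none, none)
  | (t, is) :: rest =>
    if t = r then pvLoop1 r rest
    else match is with
      | i :: _ => (some i, some t)
      | [] => pvLoop1 r rest

-- A's second loop: first tab whose images contain primary_image_path, break
def pvLoop2 (pi : String) : List (String × List String) → Option String × Option String
  | [] => (none, none)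
  | (t, is) :: rest => if pi ∈ is then (some pi, some t) else pvLoop2 pi rest

-- A's third loop: overwrite on every non-removable tab with images, no break
def pvLoop3 (r : String) (acc : Option String × Option String) : List (String × List String) → Option String × Option String
  | [] => acc
  | (t, is) :: rest =>
    match is with
    | i :: _ => if t ≠ r then pvLoop3 r (some i, some t) rest else pvLoop3 r acc rest
    | [] => pvLoop3 r acc rest

def get_primary_content (removable_tab_path : String) (primary_tab_path : String) (primary_image_path : String) (tab_images_map : List (String × List String)) : Option String × Option String × (List (String × List String)) :=
  let updated := pvErase tab_images_map removable_tab_path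
  let removed := pvLookup tab_images_map removable_tab_path
  if primary_tab_path = removable_tab_path ∧ primary_image_path ∈ removed then
    let (img, tab) := pvLoop1 removable_tab_path tab_images_map
    (img, tab, updated)
  else if primary_tab_path = removable_tab_path ∧ primary_image_path ∉ removed then
    let (img, tab) := pvLoop2 primary_image_path tab_images_map
    (img, tab, updated)
  else if primary_tab_path ≠ removable_tab_path ∧ primary_image_path ∉ removed then
    let (img, tab) := pvLoop3 removable_tab_path (none, none) tab_images_map
    (img, tab, updated)
  else
    (none, none, updated)

-- ===== PORT B =====
-- one fold collecting (first_with, last_with, first_containing)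
def pvScanStep (r pi : String)
    (acc : Option (String × String) × Option (String × String) × Option String)
    (tp : String × List String) :
    Option (String × String) × Option (String × String) × Option String :=
  let (fw, lw, fc) := acc
  let (fw, lw) :=
    if tp.1 ≠ r then
      match tp.2 with
      | i :: _ => ((if fw = none then some (i, tp.1) else fw), some (i, tp.1))
      | [] => (fw, lw)
    else (fw, lw)
  let fc := if fc = none ∧ pi ∈ tp.2 then some tp.1 else fc
  (fw, lw, fc)

def get_primary_content_alt (removable_tab_path : String) (primary_tab_path : String) (primary_image_path : String) (tab_images_map : List (String × List String)) : Option String × Option String × (List (String × List String)) :=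
  let updated := pvErase tab_images_map removable_tab_path
  let removed := pvLookup tab_images_map removable_tab_path
  let st := tab_images_map.foldl (pvScanStep removable_tab_path primary_image_path) (none, none, none)
  let (img, tab) :=
    if primary_tab_path = removable_tab_path then
      if primary_image_path ∈ removed then
        match st.1 with | some (i, t) => (some i, some t) | none => (none, none)
      else
        match st.2.2 with | some t => (some primary_image_path, some t) | none => (none, none)
    else if primary_image_path ∉ removed then
      match st.2.1 with | some (i, t) => (some i, some t) | none => (none, none)
    else (none, none)
  (img, tab, updated)

-- ===== PRECONDITION & SPEC =====
-- Pre_ excludes exactly the inputs where removable_tab_path is not a key: there Python A (and B) raise KeyError at .pop.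
def Pre_get_primary_content (removable_tab_path : String) (primary_tab_path : String) (primary_image_path : String) (tab_images_map : List (String × List String)) : Prop :=
  removable_tab_path ∈ tab_images_map.map (·.1)
instance (removable_tab_path : String) (primary_tab_path : String) (primary_image_path : String) (tab_images_map : List (String × List String)) : Decidable (Pre_get_primary_content removable_tab_path primary_tab_path primary_image_path tab_images_map) := by unfold Pre_get_primary_content; infer_instance
def pvWitness_get_primary_content : String × String × String × (List (String × List String)) := ("a", "a", "x", [("a", ["x"]), ("c", ["y", "z"])])

def Spec_get_primary_content (removable_tab_path : String) (primary_tab_path : String) (primary_image_path : String) (tab_images_map : List (String × List String)) (out : Option String × Option String × (List (String × List String))) : Prop := out = get_primary_content_alt removable_tab_path primary_tab_path primary_image_path tab_images_map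
instance (removable_tab_path : String) (primary_tab_path : String) (primary_image_path : String) (tab_images_map : List (String × List String)) (out : Option String × Option String × (List (String × List String))) : Decidable (Spec_get_primary_content removable_tab_path primary_tab_path primary_image_path tab_images_map out) := by unfold Spec_get_primary_content; infer_instance

-- ===== CLAIM (what is proved, stated in full; the proofs are below) =====
def Claim_equal_get_primary_content : Prop := ∀ (removable_tab_path : String) (primary_tab_path : String) (primary_image_path : String) (tab_images_map : List (String × List String)), Dom_get_primary_content removable_tab_path primary_tab_path primary_image_path tab_images_map → Pre_get_primary_content removable_tab_path primary_tab_path primary_image_path tab_images_map → Spec_get_primary_content removable_tab_path primary_tab_path primary_image_path tab_images_map (get_primary_content removable_tab_path primary_tab_path primary_image_path tab_images_map)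

-- ===== LEMMAS AND PROOFS =====
-- candidate extractors used only by the proof
def pvF (r : String) (tp : String × List String) : Option (String × String) :=
  match tp.2 with
  | i :: _ => if tp.1 = r then none else some (i, tp.1)
  | [] => none

def pvG (pi : String) (tp : String × List String) : Option String :=
  if pi ∈ tp.2 then some tp.1 else none

def pvLW (r : String) : List (String × List String) → Option (String × String)
  | [] => none
  | tp :: rest => (pvLW r rest).or (pvF r tp)

theorem pvScanStep_eq (r pi : String) (acc : Option (String × String) × Option (String × String) × Option String) (tp : String × List String) :
    pvScanStep r pi acc tp = (acc.1.or (pvF r tp), (pvF r tp).or acc.2.1, acc.2.2.or (pvG pi tp)) := by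
  obtain ⟨fw, lw, fc⟩ := acc
  obtain ⟨t, is⟩ := tp
  simp only [pvScanStep, pvF, pvG]
  cases is with
  | nil =>
    by_cases ht : t = r <;> cases fc <;> simp [ht]
  | cons i tl =>
    by_cases ht : t = r <;> by_cases hm : pi ∈ i :: tl <;>
      cases fw <;> cases fc <;> simp [ht, hm]

theorem pvScan_foldl (r pi : String) (m : List (String × List String)) :
    ∀ (fw lw : Option (String × String)) (fc : Option String),
    m.foldl (pvScanStep r pi) (fw, lw, fc) =
      (fw.or (m.findSome? (pvF r)), (pvLW r m).or lw, fc.or (m.findSome? (pvG pi))) := by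
  induction m with
  | nil => intro fw lw fc; simp [pvLW]
  | cons tp rest ih =>
    intro fw lw fc
    simp only [List.foldl_cons, pvScanStep_eq, ih, List.findSome?_cons, pvLW]
    cases hf : pvF r tp <;> cases hg : pvG pi tp <;> cases hl : pvLW r rest <;>
      cases fw <;> cases fc <;> simp

theorem pvLoop1_eq (r : String) (m : List (String × List String)) :
    pvLoop1 r m = (match m.findSome? (pvF r) with
      | some (i, t) => (some i, some t)
      | none => ((none : Option String), (none : Option String))) := by
  induction m with
  | nil => simp [pvLoop1]
  | cons tp rest ih =>
    obtain ⟨t, is⟩ := tp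
    simp only [pvLoop1, List.findSome?_cons]
    cases is with
    | nil => by_cases ht : t = r <;> simp [ht, pvF, ih]
    | cons i tl => by_cases ht : t = r <;> simp [ht, pvF, ih]

theorem pvLoop2_eq (pi : String) (m : List (String × List String)) :
    pvLoop2 pi m = (match m.findSome? (pvG pi) with
      | some t => (some pi, some t)
      | none => ((none : Option String), (none : Option String))) := by
  induction m with
  | nil => simp [pvLoop2]
  | cons tp rest ih =>
    obtain ⟨t, is⟩ := tp
    simp only [pvLoop2, List.findSome?_cons]
    by_cases hm : pi ∈ is <;> simp [hm, pvG, ih]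

theorem pvLoop3_eq (r : String) (m : List (String × List String)) :
    ∀ (acc : Option String × Option String),
    pvLoop3 r acc m = (match pvLW r m with
      | some (i, t) => (some i, some t)
      | none => acc) := by
  induction m with
  | nil => intro acc; simp [pvLoop3, pvLW]
  | cons tp rest ih =>
    intro acc
    obtain ⟨t, is⟩ := tp
    simp only [pvLoop3, pvLW]
    cases is with
    | nil =>
      simp only [pvF]
      cases h : pvLW r rest <;> simp [ih, h]
    | cons i tl =>
      by_cases ht : t = r <;>
        cases h : pvLW r rest <;> simp [pvF, ht, ih, h]

-- ===== VERDICT (by name: the statement is the Claim_ definition above) =====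
theorem get_primary_content_spec : Claim_equal_get_primary_content := by
  intro r p pi m _ _
  unfold Spec_get_primary_content get_primary_content get_primary_content_alt
  simp only [pvScan_foldl, pvLoop1_eq, pvLoop2_eq, pvLoop3_eq, Option.none_or, Option.or_none]
  by_cases hp : p = r <;> by_cases hm : pi ∈ pvLookup m r <;> simp [hp, hm]
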